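-- pv_equiv track=rewrite | github.com/SizeLee/dDensityGraphMining | dataContainer.py | __union2sortedlist_noContainEachOther
-- ===== SOURCE A (Python) =====
-- def __union2sortedlist_noContainEachOther(vlists, vlistb):  ##if one contains each another, return empty list
--     if len(vlists)>len(vlistb):
--         temp = vlistb
--         vlistb = vlists
--         vlists = temp
--
--     indexs = 0
--     indexb = 0
--     containflag = True
--     unionlist = []
--     while(indexs < len(vlists) and indexb < len(vlistb)):
--         if vlistb[indexb] < vlists[indexs]:
--             unionlist.append(vlistb[indexb])
--             indexb += 1
--         elif vlistb[indexb] == vlists[indexs]: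
--             unionlist.append(vlistb[indexb])
--             indexb += 1
--             indexs += 1
--         else:
--             containflag = False
--             unionlist.append(vlists[indexs])
--             indexs += 1
--
--     if indexs < len(vlists):
--         # containflag = False
--         unionlist = unionlist + vlists[indexs:]
--
--     elif indexb < len(vlistb):
--         if containflag:
--             return []
--         unionlist = unionlist + vlistb[indexb:]
--
--     else:
--         if containflag:
--             return []
--
--     return unionlist
-- ===== SOURCE B (Python) =====
-- def __union2sortedlist_noContainEachOther(vlists, vlistb):
--     s, b = (vlists, vlistb) if len(vlists) <= len(vlistb) else (vlistb, vlists)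
--     if _contained(s, b):
--         return []
--     return _merge(s, b)
--
-- def _contained(s, b):
--     # greedy scan: every element of s must be matched, in order, by an equal
--     # element of b after skipping smaller ones
--     i = 0
--     for x in s:
--         while i < len(b) and b[i] < x:
--             i += 1
--         if i == len(b) or b[i] != x:
--             return False
--         i += 1
--     return True
--
-- def _merge(s, b):
--     u = []
--     i = 0
--     j = 0
--     while i < len(s) and j < len(b):
--         if b[j] <= s[i]:
--             if b[j] == s[i]:
--                 i += 1
--             u.append(b[j])
--             j += 1
--         else:
--             u.append(s[i])
--             i += 1
--     return u + s[i:] + b[j:]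
-- ===== Notes on version B (the rewrite author's own statement) =====
-- stated objective: alternative
-- what changed: Splits A's single fused loop (index pair + containflag, which always builds the union list even when it is discarded) into two staged passes: a standalone greedy containment scan that returns [] early without building anything, and a flagless merge loop that runs only in the non-contained case.
import Mathlib
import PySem

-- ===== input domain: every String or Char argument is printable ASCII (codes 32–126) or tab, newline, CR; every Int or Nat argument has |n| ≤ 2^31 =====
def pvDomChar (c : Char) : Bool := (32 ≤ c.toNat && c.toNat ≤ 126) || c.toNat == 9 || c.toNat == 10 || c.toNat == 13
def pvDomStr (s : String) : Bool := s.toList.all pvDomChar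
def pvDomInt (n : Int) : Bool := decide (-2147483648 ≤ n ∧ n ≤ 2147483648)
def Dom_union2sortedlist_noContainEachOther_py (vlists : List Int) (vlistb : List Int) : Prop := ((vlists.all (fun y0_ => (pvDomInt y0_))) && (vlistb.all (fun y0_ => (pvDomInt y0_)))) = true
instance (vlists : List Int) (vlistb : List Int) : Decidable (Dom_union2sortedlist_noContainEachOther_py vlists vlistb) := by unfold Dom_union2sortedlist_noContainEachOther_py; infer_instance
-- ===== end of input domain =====

-- B splits A's fused loop (index pair + containflag, union built even when discarded)
-- into two staged passes: a greedy containment scan that returns [] early building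
-- nothing, then a flagless merge run only otherwise; objective: alternative.

-- ===== PORT A =====
-- the while loop of A: state (unionlist, indexs, indexb, containflag)
def pyA_loop (s b : List Int) (is ib : Nat) (flag : Bool) (acc : List Int) :
    List Int × Nat × Nat × Bool :=
  if h : is < s.length ∧ ib < b.length then
    if b[ib]'h.2 < s[is]'h.1 then
      pyA_loop s b is (ib + 1) flag (acc ++ [b[ib]'h.2])
    else if b[ib]'h.2 = s[is]'h.1 then
      pyA_loop s b (is + 1) (ib + 1) flag (acc ++ [b[ib]'h.2])
    else
      pyA_loop s b (is + 1) ib false (acc ++ [s[is]'h.1])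
  else (acc, is, ib, flag)
termination_by (s.length - is) + (b.length - ib)
decreasing_by all_goals omega

-- A's body after the initial swap
def pyA_main (s b : List Int) : List Int :=
  let r := pyA_loop s b 0 0 true []
  let u := r.1
  let is := r.2.1
  let ib := r.2.2.1
  let f := r.2.2.2
  if is < s.length then u ++ PySem.List.slice s (some (is : Int)) none
  else if ib < b.length then (if f then [] else u ++ PySem.List.slice b (some (ib : Int)) none)
  else (if f then [] else u)

def union2sortedlist_noContainEachOther_py (vlists : List Int) (vlistb : List Int) : List Int :=
  if vlists.length > vlistb.length then pyA_main vlistb vlists else pyA_main vlists vlistb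

-- ===== PORT B =====
-- the inner 'while i < len(b) and b[i] < x' of _contained
def pySkip (b : List Int) (x : Int) (i : Nat) : Nat :=
  if h : i < b.length then
    if b[i]'h < x then pySkip b x (i + 1) else i
  else i
termination_by b.length - i
decreasing_by omega

-- the 'for x in s' of _contained with its early 'return False'
def pyContainedAux (b : List Int) : List Int → Nat → Bool
  | [], _ => true
  | x :: t, i =>
      if h : pySkip b x i < b.length then
        if b[pySkip b x i]'h = x then pyContainedAux b t (pySkip b x i + 1) else false
      else false

def pyContained (s b : List Int) : Bool := pyContainedAux b s 0

-- the while loop of _merge; 's[i:] + b[j:]' at the exit is the two slices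
def pyMergeLoop (s b : List Int) (i j : Nat) (u : List Int) : List Int :=
  if h : i < s.length ∧ j < b.length then
    if b[j]'h.2 ≤ s[i]'h.1 then
      if b[j]'h.2 = s[i]'h.1 then pyMergeLoop s b (i + 1) (j + 1) (u ++ [b[j]'h.2])
      else pyMergeLoop s b i (j + 1) (u ++ [b[j]'h.2])
    else pyMergeLoop s b (i + 1) j (u ++ [s[i]'h.1])
  else u ++ PySem.List.slice s (some (i : Int)) none ++ PySem.List.slice b (some (j : Int)) none
termination_by (s.length - i) + (b.length - j)
decreasing_by all_goals omega

def pyB_main (s b : List Int) : List Int :=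
  if pyContained s b then [] else pyMergeLoop s b 0 0 []

def union2sortedlist_noContainEachOther_py_alt (vlists : List Int) (vlistb : List Int) : List Int :=
  let p := if vlists.length ≤ vlistb.length then (vlists, vlistb) else (vlistb, vlists)
  pyB_main p.1 p.2

-- ===== PRECONDITION & SPEC =====
def Spec_union2sortedlist_noContainEachOther_py (vlists : List Int) (vlistb : List Int) (out : List Int) : Prop := out = union2sortedlist_noContainEachOther_py_alt vlists vlistb
instance (vlists : List Int) (vlistb : List Int) (out : List Int) : Decidable (Spec_union2sortedlist_noContainEachOther_py vlists vlistb out) := by unfold Spec_union2sortedlist_noContainEachOther_py; infer_instance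

-- ===== CLAIM (what is proved, stated in full; the proofs are below) =====
def Claim_equal_union2sortedlist_noContainEachOther_py : Prop := ∀ (vlists : List Int) (vlistb : List Int), Dom_union2sortedlist_noContainEachOther_py vlists vlistb → Spec_union2sortedlist_noContainEachOther_py vlists vlistb (union2sortedlist_noContainEachOther_py vlists vlistb)

-- ===== LEMMAS AND PROOFS =====

-- functional core of A's merge loop: (emitted, rest of s, rest of b, flag)
def mrgCore : List Int → List Int → Bool → List Int × List Int × List Int × Bool
  | [], b, f => ([], [], b, f)
  | x :: ss, [], f => ([], x :: ss, [], f)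
  | x :: ss, y :: bb, f =>
    if y < x then
      let r := mrgCore (x :: ss) bb f
      (y :: r.1, r.2)
    else if y = x then
      let r := mrgCore ss bb f
      (y :: r.1, r.2)
    else
      let r := mrgCore ss (y :: bb) false
      (x :: r.1, r.2)
termination_by s b _ => s.length + b.length

theorem loop_eq (s b : List Int) :
    ∀ (is ib : Nat) (flag : Bool) (acc : List Int), is ≤ s.length → ib ≤ b.length →
    pyA_loop s b is ib flag acc =
      (acc ++ (mrgCore (s.drop is) (b.drop ib) flag).1,
       s.length - (mrgCore (s.drop is) (b.drop ib) flag).2.1.length,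
       b.length - (mrgCore (s.drop is) (b.drop ib) flag).2.2.1.length,
       (mrgCore (s.drop is) (b.drop ib) flag).2.2.2) := by
  intro is ib flag acc
  fun_induction pyA_loop s b is ib flag acc with
  | case1 is ib flag acc h hlt ih =>
      intro h1 h2
      have ihv := ih (by omega) (by omega)
      rw [ihv]
      have hds : s.drop is = s[is]'h.1 :: s.drop (is + 1) := (List.getElem_cons_drop h.1).symm
      have hdb : b.drop ib = b[ib]'h.2 :: b.drop (ib + 1) := (List.getElem_cons_drop h.2).symm
      rw [hds, hdb]
      rw [show mrgCore (s[is]'h.1 :: s.drop (is + 1)) (b[ib]'h.2 :: b.drop (ib + 1)) flag =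
          (b[ib]'h.2 :: (mrgCore (s[is]'h.1 :: s.drop (is + 1)) (b.drop (ib + 1)) flag).1,
           (mrgCore (s[is]'h.1 :: s.drop (is + 1)) (b.drop (ib + 1)) flag).2) from by
        rw [mrgCore]; rw [if_pos hlt]]
      rw [← hds]
      simp [List.append_assoc]
  | case2 is ib flag acc h hlt heq ih =>
      intro h1 h2
      have ihv := ih (by omega) (by omega)
      rw [ihv]
      have hds : s.drop is = s[is]'h.1 :: s.drop (is + 1) := (List.getElem_cons_drop h.1).symm
      have hdb : b.drop ib = b[ib]'h.2 :: b.drop (ib + 1) := (List.getElem_cons_drop h.2).symm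
      rw [hds, hdb]
      rw [show mrgCore (s[is]'h.1 :: s.drop (is + 1)) (b[ib]'h.2 :: b.drop (ib + 1)) flag =
          (b[ib]'h.2 :: (mrgCore (s.drop (is + 1)) (b.drop (ib + 1)) flag).1,
           (mrgCore (s.drop (is + 1)) (b.drop (ib + 1)) flag).2) from by
        rw [mrgCore]; rw [if_neg hlt, if_pos heq]]
      simp [List.append_assoc]
  | case3 is ib flag acc h hlt heq ih =>
      intro h1 h2
      have ihv := ih (by omega) (by omega)
      rw [ihv]
      have hds : s.drop is = s[is]'h.1 :: s.drop (is + 1) := (List.getElem_cons_drop h.1).symm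
      have hdb : b.drop ib = b[ib]'h.2 :: b.drop (ib + 1) := (List.getElem_cons_drop h.2).symm
      rw [hds, hdb]
      rw [show mrgCore (s[is]'h.1 :: s.drop (is + 1)) (b[ib]'h.2 :: b.drop (ib + 1)) flag =
          (s[is]'h.1 :: (mrgCore (s.drop (is + 1)) (b[ib]'h.2 :: b.drop (ib + 1)) false).1,
           (mrgCore (s.drop (is + 1)) (b[ib]'h.2 :: b.drop (ib + 1)) false).2) from by
        rw [mrgCore]; rw [if_neg hlt, if_neg heq]]
      rw [← hdb]
      simp [List.append_assoc]
  | case4 is ib flag acc h =>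
      intro h1 h2
      by_cases his : is < s.length
      · have hib : ib = b.length := by
          by_contra hc
          exact h ⟨his, by omega⟩
        have hdb : b.drop ib = [] := by
          subst hib; simp
        rcases hd : s.drop is with _ | ⟨x, rest⟩
        · exfalso
          have := congrArg List.length hd
          simp at this
          omega
        · rw [hdb]
          rw [show mrgCore (x :: rest) [] flag = ([], x :: rest, [], flag) from by rw [mrgCore]]
          have hlen : (s.drop is).length = s.length - is := List.length_drop ..
          rw [hd] at hlen
          simp only [List.length_cons] at hlen
          simp only [List.append_nil, List.length_cons, List.length_nil]
          have : s.length - (rest.length + 1) = is := by omega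
          rw [this]
          simp [hib]
      · have his' : is = s.length := by omega
        have hds : s.drop is = [] := by
          subst his'; simp
        rw [hds]
        rw [show mrgCore [] (b.drop ib) flag = ([], [], b.drop ib, flag) from by rw [mrgCore]]
        simp only [List.append_nil, List.length_nil, List.length_drop]
        have e1 : s.length - 0 = is := by omega
        have e2 : b.length - (b.length - ib) = ib := by omega
        rw [e1, e2]

theorem mrgCore_suffix (s b : List Int) (f : Bool) :
    (mrgCore s b f).2.1 <:+ s ∧ (mrgCore s b f).2.2.1 <:+ b := by
  fun_induction mrgCore s b f with
  | case1 b f => exact ⟨List.nil_suffix, List.suffix_refl _⟩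
  | case2 x ss f => exact ⟨List.suffix_refl _, List.nil_suffix⟩
  | case3 x ss y bb f h r ih => exact ⟨ih.1, ih.2.trans (List.suffix_cons _ _)⟩
  | case4 ss y bb f r h ih =>
      exact ⟨ih.1.trans (List.suffix_cons _ _), ih.2.trans (List.suffix_cons _ _)⟩
  | case5 x ss y bb f h1 h2 r ih => exact ⟨ih.1.trans (List.suffix_cons _ _), ih.2⟩

theorem mrgCore_excl (s b : List Int) (f : Bool) :
    (mrgCore s b f).2.1 = [] ∨ (mrgCore s b f).2.2.1 = [] := by
  fun_induction mrgCore s b f <;>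
    first
    | exact Or.inl rfl
    | exact Or.inr rfl
    | assumption

theorem mrgCore_flag_mono (s b : List Int) (f : Bool) :
    (mrgCore s b f).2.2.2 = true → f = true := by
  fun_induction mrgCore s b f with
  | case1 b f => exact fun h => h
  | case2 x ss f => exact fun h => h
  | case3 x ss y bb f h r ih => exact ih
  | case4 ss y bb f r h ih => exact ih
  | case5 x ss y bb f h1 h2 r ih => exact fun hh => absurd (ih hh) (by simp)

-- the emitted list and both rests do not depend on the incoming flag
theorem mrgCore_indep (s b : List Int) (f g : Bool) :
    (mrgCore s b f).1 = (mrgCore s b g).1 ∧ (mrgCore s b f).2.1 = (mrgCore s b g).2.1 ∧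
      (mrgCore s b f).2.2.1 = (mrgCore s b g).2.2.1 := by
  fun_induction mrgCore s b f with
  | case1 b f => rw [show mrgCore [] b g = ([], [], b, g) from by rw [mrgCore]]; exact ⟨rfl, rfl, rfl⟩
  | case2 x ss f => rw [show mrgCore (x :: ss) [] g = ([], x :: ss, [], g) from by rw [mrgCore]]; exact ⟨rfl, rfl, rfl⟩
  | case3 x ss y bb f h r ih =>
      rw [show mrgCore (x :: ss) (y :: bb) g =
          (y :: (mrgCore (x :: ss) bb g).1, (mrgCore (x :: ss) bb g).2) from by
        rw [mrgCore]; rw [if_pos h]]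
      rw [show r = mrgCore (x :: ss) bb f from rfl]
      exact ⟨by rw [ih.1], ih.2.1, ih.2.2⟩
  | case4 ss y bb f r h ih =>
      rw [show mrgCore (y :: ss) (y :: bb) g =
          (y :: (mrgCore ss bb g).1, (mrgCore ss bb g).2) from by
        rw [mrgCore]; rw [if_neg h, if_pos rfl]]
      rw [show r = mrgCore ss bb f from rfl]
      exact ⟨by rw [ih.1], ih.2.1, ih.2.2⟩
  | case5 x ss y bb f h1 h2 r ih =>
      rw [show mrgCore (x :: ss) (y :: bb) g =
          (x :: (mrgCore ss (y :: bb) false).1, (mrgCore ss (y :: bb) false).2) from by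
        rw [mrgCore]; rw [if_neg h1, if_neg h2]]
      rw [show r = mrgCore ss (y :: bb) false from rfl]
      exact ⟨rfl, rfl, rfl⟩

theorem drop_sub_length_of_suffix (u l : List Int) (h : u <:+ l) :
    l.drop (l.length - u.length) = u := by
  obtain ⟨t, ht⟩ := h
  conv_lhs => rw [← ht]
  have hlen : (t ++ u).length - u.length = t.length := by
    rw [List.length_append]; omega
  rw [hlen, List.drop_left]

-- A returns [] iff the s-rest is empty with the flag still true; else merged output
theorem pyA_main_char (s b : List Int) :
    pyA_main s b =
      if (mrgCore s b true).2.1 = [] ∧ (mrgCore s b true).2.2.2 = true then []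
      else (mrgCore s b true).1 ++ (mrgCore s b true).2.1 ++ (mrgCore s b true).2.2.1 := by
  have hle := loop_eq s b 0 0 true [] (by omega) (by omega)
  simp only [List.drop_zero] at hle
  have hsufS := (mrgCore_suffix s b true).1
  have hsufB := (mrgCore_suffix s b true).2
  have hslen := hsufS.length_le
  have hblen := hsufB.length_le
  have hdropS : PySem.List.slice s
      (some ((s.length - (mrgCore s b true).2.1.length : Nat) : Int)) none =
      (mrgCore s b true).2.1 := by
    rw [PySem.List.slice_from_natCast]
    exact drop_sub_length_of_suffix _ _ hsufS
  have hdropB : PySem.List.slice b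
      (some ((b.length - (mrgCore s b true).2.2.1.length : Nat) : Int)) none =
      (mrgCore s b true).2.2.1 := by
    rw [PySem.List.slice_from_natCast]
    exact drop_sub_length_of_suffix _ _ hsufB
  unfold pyA_main
  rw [hle]
  dsimp only
  simp only [List.nil_append]
  rw [hdropS, hdropB]
  by_cases hsr : (mrgCore s b true).2.1 = []
  · rw [hsr]
    rw [if_neg (show ¬ s.length - ([] : List Int).length < s.length by simp)]
    by_cases hfl : (mrgCore s b true).2.2.2 = true
    · conv_rhs => rw [if_pos ⟨rfl, hfl⟩]
      simp [hfl]
    · conv_rhs => rw [if_neg (show ¬ (([] : List Int) = [] ∧ (mrgCore s b true).2.2.2 = true) from by rintro ⟨-, h2⟩; exact hfl h2)]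
      by_cases hbr : (mrgCore s b true).2.2.1 = []
      · rw [hbr, if_neg (show ¬ b.length - ([] : List Int).length < b.length by simp)]
        simp [hfl]
      · have hbrpos : 0 < (mrgCore s b true).2.2.1.length := List.length_pos_iff.mpr hbr
        have hblen2 := ((mrgCore_suffix s b true).2).length_le
        rw [if_pos (show b.length - (mrgCore s b true).2.2.1.length < b.length by omega)]
        simp [hfl]
  · conv_rhs => rw [if_neg (show ¬ ((mrgCore s b true).2.1 = [] ∧ (mrgCore s b true).2.2.2 = true) from by rintro ⟨h1, -⟩; exact hsr h1)]
    have hbr : (mrgCore s b true).2.2.1 = [] := (mrgCore_excl s b true).resolve_left hsr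
    have hsrpos : 0 < (mrgCore s b true).2.1.length := List.length_pos_iff.mpr hsr
    rw [if_pos (show s.length - (mrgCore s b true).2.1.length < s.length by omega), hbr]
    simp

-- unfolding lemmas for pySkip
theorem pySkip_ge (b : List Int) (x : Int) (i : Nat) (h : ¬ i < b.length) :
    pySkip b x i = i := by
  rw [pySkip]; rw [dif_neg h]

theorem pySkip_lt_lt (b : List Int) (x : Int) (i : Nat) (h : i < b.length)
    (hlt : b[i]'h < x) : pySkip b x i = pySkip b x (i + 1) := by
  conv_lhs => rw [pySkip]
  rw [dif_pos h, if_pos hlt]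

theorem pySkip_lt_ge (b : List Int) (x : Int) (i : Nat) (h : i < b.length)
    (hge : ¬ b[i]'h < x) : pySkip b x i = i := by
  rw [pySkip]; rw [dif_pos h, if_neg hge]

-- the greedy scan decides exactly A's containment condition (rest of s empty, flag true)
theorem containedAux_iff (b : List Int) :
    ∀ (n : Nat) (s : List Int) (i : Nat), s.length + (b.length - i) ≤ n → i ≤ b.length →
    (pyContainedAux b s i = true ↔
      ((mrgCore s (b.drop i) true).2.1 = [] ∧ (mrgCore s (b.drop i) true).2.2.2 = true)) := by
  intro n
  induction n with
  | zero =>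
      intro s i hn hi
      have hs : s = [] := by
        cases s with
        | nil => rfl
        | cons x t => simp [List.length_cons] at hn
      subst hs
      rw [show mrgCore [] (b.drop i) true = ([], [], b.drop i, true) from by rw [mrgCore]]
      simp [pyContainedAux]
  | succ n ih =>
      intro s i hn hi
      cases s with
      | nil =>
          rw [show mrgCore [] (b.drop i) true = ([], [], b.drop i, true) from by rw [mrgCore]]
          simp [pyContainedAux]
      | cons x t =>
          by_cases hib : i < b.length
          · have hdb : b.drop i = b[i]'hib :: b.drop (i + 1) := (List.getElem_cons_drop hib).symm
            by_cases hlt : b[i]'hib < x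
            · -- skip one element of b
              have hskip : pySkip b x i = pySkip b x (i + 1) := pySkip_lt_lt b x i hib hlt
              have hstep : pyContainedAux b (x :: t) i = pyContainedAux b (x :: t) (i + 1) := by
                conv_lhs => rw [pyContainedAux]
                conv_rhs => rw [pyContainedAux]
                rw [hskip]
              rw [hstep]
              rw [ih (x :: t) (i + 1) (by simp only [List.length_cons] at hn ⊢; omega) (by omega)]
              rw [hdb]
              rw [show mrgCore (x :: t) (b[i]'hib :: b.drop (i + 1)) true =
                  (b[i]'hib :: (mrgCore (x :: t) (b.drop (i + 1)) true).1,
                   (mrgCore (x :: t) (b.drop (i + 1)) true).2) from by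
                rw [mrgCore]; rw [if_pos hlt]]
            · by_cases heq : b[i]'hib = x
              · -- match: both advance
                have hskip : pySkip b x i = i := pySkip_lt_ge b x i hib hlt
                have hstep : pyContainedAux b (x :: t) i = pyContainedAux b t (i + 1) := by
                  conv_lhs => rw [pyContainedAux]
                  rw [hskip]
                  rw [dif_pos hib, if_pos heq]
                rw [hstep]
                rw [ih t (i + 1) (by simp only [List.length_cons] at hn ⊢; omega) (by omega)]
                rw [hdb]
                rw [show mrgCore (x :: t) (b[i]'hib :: b.drop (i + 1)) true =
                    (b[i]'hib :: (mrgCore t (b.drop (i + 1)) true).1,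
                     (mrgCore t (b.drop (i + 1)) true).2) from by
                  rw [mrgCore]; rw [if_neg hlt, if_pos heq]]
              · -- b's head is larger: the scan fails and A's flag falls
                have hskip : pySkip b x i = i := pySkip_lt_ge b x i hib hlt
                have hstep : pyContainedAux b (x :: t) i = false := by
                  conv_lhs => rw [pyContainedAux]
                  rw [hskip]
                  rw [dif_pos hib, if_neg heq]
                rw [hstep]
                rw [hdb]
                rw [show mrgCore (x :: t) (b[i]'hib :: b.drop (i + 1)) true =
                    (x :: (mrgCore t (b[i]'hib :: b.drop (i + 1)) false).1,
                     (mrgCore t (b[i]'hib :: b.drop (i + 1)) false).2) from by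
                  rw [mrgCore]; rw [if_neg hlt, if_neg heq]]
                refine iff_of_false (by simp) ?_
                rintro ⟨-, hfl⟩
                exact absurd (mrgCore_flag_mono _ _ _ hfl) (by simp)
          · -- b exhausted while s is not: scan fails, A's s-rest is nonempty
            have hdb : b.drop i = [] := List.drop_eq_nil_of_le (by omega)
            have hskip : pySkip b x i = i := pySkip_ge b x i hib
            have hstep : pyContainedAux b (x :: t) i = false := by
              conv_lhs => rw [pyContainedAux]
              rw [hskip]
              rw [dif_neg hib]
            rw [hstep, hdb]
            rw [show mrgCore (x :: t) [] true = ([], x :: t, [], true) from by rw [mrgCore]]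
            refine iff_of_false (by simp) ?_
            rintro ⟨h1, -⟩
            exact List.cons_ne_nil _ _ h1

-- B's merge loop computes emitted ++ rest-of-s ++ rest-of-b
theorem mergeLoop_eq (s b : List Int) :
    ∀ (i j : Nat) (u : List Int), i ≤ s.length → j ≤ b.length →
    pyMergeLoop s b i j u =
      u ++ (mrgCore (s.drop i) (b.drop j) true).1 ++ (mrgCore (s.drop i) (b.drop j) true).2.1 ++
        (mrgCore (s.drop i) (b.drop j) true).2.2.1 := by
  intro i j u
  fun_induction pyMergeLoop s b i j u with
  | case1 i j u h hle heq ih =>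
      -- b[j] = s[i]: both advance
      intro h1 h2
      rw [ih (by omega) (by omega)]
      have hds : s.drop i = s[i]'h.1 :: s.drop (i + 1) := (List.getElem_cons_drop h.1).symm
      have hdb : b.drop j = b[j]'h.2 :: b.drop (j + 1) := (List.getElem_cons_drop h.2).symm
      rw [hds, hdb]
      rw [show mrgCore (s[i]'h.1 :: s.drop (i + 1)) (b[j]'h.2 :: b.drop (j + 1)) true =
          (b[j]'h.2 :: (mrgCore (s.drop (i + 1)) (b.drop (j + 1)) true).1,
           (mrgCore (s.drop (i + 1)) (b.drop (j + 1)) true).2) from by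
        rw [mrgCore]; rw [if_neg (by omega), if_pos heq]]
      simp [List.append_assoc]
  | case2 i j u h hle heq ih =>
      -- b[j] < s[i]: emit b[j]
      intro h1 h2
      rw [ih (by omega) (by omega)]
      have hds : s.drop i = s[i]'h.1 :: s.drop (i + 1) := (List.getElem_cons_drop h.1).symm
      have hdb : b.drop j = b[j]'h.2 :: b.drop (j + 1) := (List.getElem_cons_drop h.2).symm
      rw [hdb]
      rw [hds]
      rw [show mrgCore (s[i]'h.1 :: s.drop (i + 1)) (b[j]'h.2 :: b.drop (j + 1)) true =
          (b[j]'h.2 :: (mrgCore (s[i]'h.1 :: s.drop (i + 1)) (b.drop (j + 1)) true).1,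
           (mrgCore (s[i]'h.1 :: s.drop (i + 1)) (b.drop (j + 1)) true).2) from by
        rw [mrgCore]; rw [if_pos (by omega)]]
      rw [← hds]
      simp [List.append_assoc]
  | case3 i j u h hgt ih =>
      -- s[i] < b[j]: emit s[i]; the flag flip is invisible to the emitted parts
      intro h1 h2
      rw [ih (by omega) (by omega)]
      have hds : s.drop i = s[i]'h.1 :: s.drop (i + 1) := (List.getElem_cons_drop h.1).symm
      have hdb : b.drop j = b[j]'h.2 :: b.drop (j + 1) := (List.getElem_cons_drop h.2).symm
      conv_rhs => rw [hds, hdb]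
      conv_rhs => rw [show mrgCore (s[i]'h.1 :: s.drop (i + 1)) (b[j]'h.2 :: b.drop (j + 1)) true =
          (s[i]'h.1 :: (mrgCore (s.drop (i + 1)) (b[j]'h.2 :: b.drop (j + 1)) false).1,
           (mrgCore (s.drop (i + 1)) (b[j]'h.2 :: b.drop (j + 1)) false).2) from by
        rw [mrgCore]; rw [if_neg (by omega), if_neg (by omega)]]
      rw [← hdb]
      obtain ⟨e1, e2, e3⟩ := mrgCore_indep (s.drop (i + 1)) (b.drop j) true false
      dsimp only
      rw [← e1, ← e2, ← e3]
      simp [List.append_assoc]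
  | case4 i j u h =>
      intro h1 h2
      rw [PySem.List.slice_from_natCast, PySem.List.slice_from_natCast]
      by_cases his : i < s.length
      · have hjb : j = b.length := by
          by_contra hc
          exact h ⟨his, by omega⟩
        have hdb : b.drop j = [] := by subst hjb; simp
        rcases hd : s.drop i with _ | ⟨x, rest⟩
        · exfalso
          have := congrArg List.length hd
          simp at this
          omega
        · rw [hdb]
          rw [show mrgCore (x :: rest) [] true = ([], x :: rest, [], true) from by rw [mrgCore]]
          rw [← hd]
          simp
      · have hds : s.drop i = [] := List.drop_eq_nil_of_le (by omega)
        rw [hds]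
        rw [show mrgCore [] (b.drop j) true = ([], [], b.drop j, true) from by rw [mrgCore]]
        simp

theorem main_eq (s b : List Int) : pyA_main s b = pyB_main s b := by
  rw [pyA_main_char]
  unfold pyB_main pyContained
  have hiff := containedAux_iff b (s.length + (b.length - 0)) s 0 (by omega) (by omega)
  simp only [List.drop_zero] at hiff
  by_cases hc : (mrgCore s b true).2.1 = [] ∧ (mrgCore s b true).2.2.2 = true
  · rw [if_pos hc, if_pos (hiff.mpr hc)]
  · rw [if_neg hc, if_neg (fun hh => hc (hiff.mp hh))]
    rw [mergeLoop_eq s b 0 0 [] (by omega) (by omega)]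
    simp

-- ===== VERDICT (by name: the statement is the Claim_ definition above) =====
theorem union2sortedlist_noContainEachOther_py_spec : Claim_equal_union2sortedlist_noContainEachOther_py := by
  intro vlists vlistb _
  unfold Spec_union2sortedlist_noContainEachOther_py
  unfold union2sortedlist_noContainEachOther_py union2sortedlist_noContainEachOther_py_alt
  by_cases h : vlists.length ≤ vlistb.length
  · rw [if_neg (by omega), if_pos h]
    exact main_eq vlists vlistb
  · rw [if_pos (by omega), if_neg h]
    exact main_eq vlistb vlists
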